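-- pv_equiv track=rewrite | github.com/Jseptic/lpcc | LPCC_PRACT/macro/a7.py | generate_mnt
-- ===== SOURCE A (Python) =====
-- def generate_mnt(lines):
--     mnt = []           # List to store MNT entries: each entry is (Macro Name, Param Count, Macro Index)
--     macro_index = 1
--     i = 0
--     while i < len(lines):
--         line = lines[i].strip()
--         if not line:
--             i += 1
--             continue
--         tokens = line.split()
--         if tokens[0].upper() == "MACRO":
--             header_parts = line.split(None, 2)  # Split into "MACRO", macro_name, [parameter list]
--             macro_name = header_parts[1]
--             if len(header_parts) > 2:
--                 params = [param.strip() for param in header_parts[2].split(',')]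
--             else:
--                 params = []
--             mnt.append((macro_name, len(params), macro_index))
--             macro_index += 1
--             # Skip the macro body until MEND is encountered
--             while i < len(lines) and lines[i].strip().upper() != "MEND":
--                 i += 1
--         i += 1
--     return mnt
-- ===== SOURCE B (Python) =====
-- def generate_mnt(lines):
--     # Two staged passes over an index of line positions: first build the sorted
--     # position lists of MACRO-header lines and MEND lines, then walk the header
--     # positions with a cursor, jumping past each body to just after its first
--     # following MEND position.  No per-line state machine, no inner body scan.
--     macro_pos = []
--     mend_pos = []
--     for j, raw in enumerate(lines):
--         s = raw.strip()
--         if s.upper() == "MEND":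
--             mend_pos.append(j)
--         else:
--             t = s.split()
--             if t and t[0].upper() == "MACRO":
--                 macro_pos.append(j)
--     mnt = []
--     cursor = 0
--     for h in macro_pos:
--         if h < cursor:
--             continue  # header inside a macro body: not a definition
--         parts = lines[h].strip().split(None, 2)
--         if len(parts) > 2:
--             params = [p.strip() for p in parts[2].split(',')]
--         else:
--             params = []
--         mnt.append((parts[1], len(params), len(mnt) + 1))
--         nxt = next((p for p in mend_pos if p >= h), None)
--         cursor = len(lines) if nxt is None else nxt + 1
--     return mnt
-- ===== Notes on version B (the rewrite author's own statement) =====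
-- stated objective: alternative
-- what changed: Replaced A's single online scan (index-driven while loop with a nested skip-while over each macro body) by two staged passes: pass 1 builds position indexes (sorted lists) of MACRO-header lines and MEND lines, pass 2 walks the header-position index with a cursor, finding each body's closing MEND by lookup in the MEND index instead of rescanning the lines.
-- outside the precondition, e.g. on generate_mnt(['MACRO M1 &X', 'MACRO', 'MEND']): A returns [('M1', 1, 1)], B returns [('M1', 1, 1)]
import Mathlib
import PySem

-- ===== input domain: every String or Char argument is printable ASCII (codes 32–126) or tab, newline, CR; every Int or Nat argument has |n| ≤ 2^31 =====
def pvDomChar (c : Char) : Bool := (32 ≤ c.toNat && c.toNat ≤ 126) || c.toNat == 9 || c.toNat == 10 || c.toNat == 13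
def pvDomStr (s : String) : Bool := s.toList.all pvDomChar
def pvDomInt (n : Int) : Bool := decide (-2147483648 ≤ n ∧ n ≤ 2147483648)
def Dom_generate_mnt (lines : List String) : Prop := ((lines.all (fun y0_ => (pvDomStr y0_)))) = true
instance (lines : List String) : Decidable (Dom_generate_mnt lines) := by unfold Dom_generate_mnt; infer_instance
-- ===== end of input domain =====

-- B replaces A's single online scan (index loop + nested body-skipping while) by two staged passes:
-- pass 1 builds position indexes of MACRO-header lines and MEND lines, pass 2 walks the header
-- positions with a cursor, finding each body's closing MEND in the MEND index (objective: alternative).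


-- ===== PORT A =====
-- inner while: advance i past the body until lines[i].strip().upper() == "MEND", then the outer i += 1
def pvSkipBody (xs : List String) : List String :=
  match xs with
  | [] => []
  | l :: rest =>
    if PySem.Str.upper (PySem.Str.strip l) ≠ "MEND" then pvSkipBody rest else rest

theorem pvSkipBody_length_le (xs : List String) : (pvSkipBody xs).length ≤ xs.length := by
  induction xs with
  | nil => simp [pvSkipBody]
  | cons l rest ih =>
    simp only [pvSkipBody]
    split
    · exact Nat.le_trans ih (Nat.le_succ _)
    · exact Nat.le_succ _

-- outer while over the remaining suffix of lines, carrying macro_index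
def pvLoopA (xs : List String) (idx : Int) : List (String × Int × Int) :=
  match _h : xs with
  | [] => []
  | l :: rest =>
    let line := PySem.Str.strip l
    if line = "" then pvLoopA rest idx
    else
      let tokens := PySem.Str.split₀ line
      -- tokens[0]: line is nonempty here, so tokens ≠ [] and the getD default is unreachable
      if PySem.Str.upper ((PySem.List.pyGet? tokens 0).getD "") = "MACRO" then
        let header_parts := PySem.Str.split₀Max line 2
        -- header_parts[1] raises IndexError in Python when absent; Pre_ excludes those inputs
        let macro_name := (PySem.List.pyGet? header_parts 1).getD ""
        let params : List String :=
          if header_parts.length > 2 then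
            ((PySem.Str.split? ((PySem.List.pyGet? header_parts 2).getD "") ",").getD []).map
              PySem.Str.strip
          else []
        (macro_name, (params.length : Int), idx) :: pvLoopA (pvSkipBody (l :: rest)) (idx + 1)
      else pvLoopA rest idx
termination_by xs.length
decreasing_by
  · simp
  · simp only [pvSkipBody]
    split
    · exact Nat.lt_succ_of_le (pvSkipBody_length_le rest)
    · exact Nat.lt_succ_self _
  · simp

def generate_mnt (lines : List String) : List (String × Int × Int) := pvLoopA lines 1

-- ===== PORT B =====
-- pass 1: the for-loop over enumerate(lines) indexing MEND positions and MACRO-header positions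
def pvClassStep (st : List Int × List Int) (js : Int × String) : List Int × List Int :=
  let s := PySem.Str.strip js.2
  if PySem.Str.upper s = "MEND" then (st.1, st.2 ++ [js.1])
  else
    let t := PySem.Str.split₀ s
    if t ≠ [] ∧ PySem.Str.upper ((PySem.List.pyGet? t 0).getD "") = "MACRO" then
      (st.1 ++ [js.1], st.2)
    else st

def pvClassify (lines : List String) : List Int × List Int :=
  (PySem.List.enumerate lines 0).foldl pvClassStep ([], [])

-- pass 2: one step of the for-loop over macro_pos; state = (cursor, mnt)
def pvStepB (lines : List String) (mend : List Int) (st : Int × List (String × Int × Int))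
    (h : Int) : Int × List (String × Int × Int) :=
  if h < st.1 then st
  else
    let parts := PySem.Str.split₀Max (PySem.Str.strip ((PySem.List.pyGet? lines h).getD "")) 2
    let params : List String :=
      if parts.length > 2 then
        ((PySem.Str.split? ((PySem.List.pyGet? parts 2).getD "") ",").getD []).map PySem.Str.strip
      else []
    let mnt' := st.2 ++ [((PySem.List.pyGet? parts 1).getD "", (params.length : Int),
                          (st.2.length : Int) + 1)]
    let nxt := mend.find? (fun p => decide (h ≤ p))
    (match nxt with
     | none => (lines.length : Int)
     | some p => p + 1, mnt')

def generate_mnt_alt (lines : List String) : List (String × Int × Int) :=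
  let ps := pvClassify lines
  (ps.1.foldl (pvStepB lines ps.2) (0, [])).2

-- ===== PRECONDITION & SPEC =====
-- Pre_ excludes inputs containing a line that strips (case-insensitively) to the bare word
-- "MACRO": on such a line outside a macro body A raises IndexError (header_parts[1] is missing);
-- inside a body the exclusion slightly over-approximates (both programs return the same value there).
def Pre_generate_mnt (lines : List String) : Prop :=
  ∀ l ∈ lines, PySem.Str.upper (PySem.Str.strip l) ≠ "MACRO"
instance (lines : List String) : Decidable (Pre_generate_mnt lines) := by
  unfold Pre_generate_mnt; infer_instance

def pvWitness_generate_mnt : List String :=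
  ["MACRO M1 &X,&Y", "  body line", "MEND", "", "MACRO M2", "MEND"]

def Spec_generate_mnt (lines : List String) (out : List (String × Int × Int)) : Prop := out = generate_mnt_alt lines
instance (lines : List String) (out : List (String × Int × Int)) : Decidable (Spec_generate_mnt lines out) := by unfold Spec_generate_mnt; infer_instance

-- ===== CLAIM (what is proved, stated in full; the proofs are below) =====
def Claim_equal_generate_mnt : Prop := ∀ (lines : List String), Dom_generate_mnt lines → Pre_generate_mnt lines → Spec_generate_mnt lines (generate_mnt lines)


-- ===== LEMMAS AND PROOFS =====

-- line classification used by the proofs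
def pvIsMend (l : String) : Bool := PySem.Str.upper (PySem.Str.strip l) == "MEND"
def pvIsHdr (l : String) : Bool :=
  (PySem.Str.strip l != "") &&
  (PySem.Str.upper ((PySem.List.pyGet? (PySem.Str.split₀ (PySem.Str.strip l)) 0).getD "") == "MACRO")

-- absolute positions (from offset k) of header / MEND lines in a list of lines
def pvHdrPos : List String → Int → List Int
  | [], _ => []
  | l :: r, k => (if pvIsHdr l then [k] else []) ++ pvHdrPos r (k + 1)

def pvMendPos : List String → Int → List Int
  | [], _ => []
  | l :: r, k => (if pvIsMend l then [k] else []) ++ pvMendPos r (k + 1)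

-- ---- string facts ----
theorem pv_upperChar_eq (c : Char) (u : Nat) (hu : 65 ≤ u ∧ u ≤ 90)
    (h : PySem.Chars.upperChar c = Char.ofNat u) : c.toNat = u ∨ c.toNat = u + 32 := by
  unfold PySem.Chars.upperChar PySem.Chars.islower at h
  have hvu : (Char.ofNat u).toNat = u := by
    rw [Char.toNat_ofNat, if_pos (Or.inl (by omega))]
  split at h
  · rename_i hlow
    simp only [Bool.and_eq_true, decide_eq_true_eq, Char.le_def, UInt32.le_iff_toNat_le] at hlow
    have h1 : ('a' : Char).val.toNat = 97 := by decide
    have h2 : ('z' : Char).val.toNat = 122 := by decide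
    have hc : 97 ≤ c.toNat ∧ c.toNat ≤ 122 := by
      constructor
      · have := hlow.1; rw [h1] at this; exact this
      · have := hlow.2; rw [h2] at this; exact this
    have h3 := congrArg Char.toNat h
    rw [hvu, Char.toNat_ofNat, if_pos (Or.inl (by omega))] at h3
    right; omega
  · left; rw [← hvu]; exact congrArg Char.toNat h

theorem pv_notspace {c : Char} {n : Nat} (h : c.toNat = n)
    (hn : 65 ≤ n ∧ n ≤ 122) : PySem.Chars.isspace c = false := by
  unfold PySem.Chars.isspace
  simp only [h, Bool.or_eq_false_iff, Bool.and_eq_false_iff, decide_eq_false_iff_not]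
  omega

theorem pv_split₀_of_upper_mend (s : List Char)
    (h : PySem.Chars.upper s = "MEND".toList) : PySem.Chars.split₀ s = [s] := by
  have hM : ('M' : Char) = Char.ofNat 77 := by decide
  have hE : ('E' : Char) = Char.ofNat 69 := by decide
  have hN : ('N' : Char) = Char.ofNat 78 := by decide
  have hD : ('D' : Char) = Char.ofNat 68 := by decide
  have hmend : "MEND".toList = ['M', 'E', 'N', 'D'] := by decide
  rw [hmend] at h
  rcases s with _ | ⟨a, _ | ⟨b, _ | ⟨c, _ | ⟨d, _ | ⟨e, t⟩⟩⟩⟩⟩ <;>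
    simp only [PySem.Chars.upper, List.map_nil, List.map_cons, List.cons.injEq,
      List.nil_eq, reduceCtorEq, and_false] at h
  obtain ⟨h1, h2, h3, h4, -⟩ := h
  have ha := pv_upperChar_eq a 77 (by omega) (hM ▸ h1)
  have hb := pv_upperChar_eq b 69 (by omega) (hE ▸ h2)
  have hc := pv_upperChar_eq c 78 (by omega) (hN ▸ h3)
  have hd := pv_upperChar_eq d 68 (by omega) (hD ▸ h4)
  have hsa : PySem.Chars.isspace a = false := by
    rcases ha with h | h <;> exact pv_notspace h (by omega)
  have hsb : PySem.Chars.isspace b = false := by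
    rcases hb with h | h <;> exact pv_notspace h (by omega)
  have hsc : PySem.Chars.isspace c = false := by
    rcases hc with h | h <;> exact pv_notspace h (by omega)
  have hsd : PySem.Chars.isspace d = false := by
    rcases hd with h | h <;> exact pv_notspace h (by omega)
  unfold PySem.Chars.split₀
  simp [PySem.Chars.split₀.go, hsa, hsb, hsc, hsd]

-- a line whose first split() token upper-cases to "MACRO" does not itself strip-upper to "MEND"
theorem pv_macro_not_mend (line : String)
    (h : PySem.Str.upper ((PySem.List.pyGet? (PySem.Str.split₀ line) 0).getD "") = "MACRO") :
    PySem.Str.upper line ≠ "MEND" := by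
  intro hm
  have hl : PySem.Chars.upper line.toList = "MEND".toList := by
    have := congrArg String.toList hm
    simpa [PySem.Str.upper, String.toList_ofList] using this
  have hsp : PySem.Chars.split₀ line.toList = [line.toList] := pv_split₀_of_upper_mend _ hl
  rw [PySem.Str.split₀, hsp] at h
  simp [PySem.List.pyGet?, PySem.List.pyIdx?, String.ofList_toList] at h
  rw [h] at hm
  exact absurd hm (by decide)

-- split₀.go returns [] only when everything seen was whitespace
theorem pv_go_eq_nil (s : List Char) : ∀ (cur : List Char) (acc : List (List Char)),
    PySem.Chars.split₀.go s cur acc = [] →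
    acc = [] ∧ cur = [] ∧ s.all PySem.Chars.isspace = true := by
  induction s with
  | nil =>
    intro cur acc h
    unfold PySem.Chars.split₀.go at h
    split at h
    · rename_i hcur
      refine ⟨by simpa using h, by simpa using hcur, rfl⟩
    · exact absurd h (by simp)
  | cons c rest ih =>
    intro cur acc h
    unfold PySem.Chars.split₀.go at h
    split at h
    · rename_i hsp
      split at h
      · rename_i hcur
        obtain ⟨h1, h2, h3⟩ := ih [] acc h
        exact ⟨h1, by simpa using hcur, by simp [hsp, h3]⟩
      · obtain ⟨h1, -, -⟩ := ih [] (cur.reverse :: acc) h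
        exact absurd h1 (by simp)
    · obtain ⟨-, h2, -⟩ := ih (c :: cur) acc h
      exact absurd h2 (by simp)

-- a nonblank stripped line has at least one split() token
theorem pv_strip_split_ne (l : String) (h : PySem.Str.strip l ≠ "") :
    PySem.Str.split₀ (PySem.Str.strip l) ≠ [] := by
  intro hq
  have htl : (PySem.Str.strip l).toList = PySem.Chars.strip l.toList := by
    simp [PySem.Str.strip, String.toList_ofList]
  have hch : PySem.Chars.split₀ (PySem.Chars.strip l.toList) = [] := by
    rw [PySem.Str.split₀] at hq
    rw [← htl]
    exact List.map_eq_nil_iff.mp hq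
  have hall : (PySem.Chars.strip l.toList).all PySem.Chars.isspace = true := by
    rw [PySem.Chars.split₀] at hch
    exact (pv_go_eq_nil _ [] [] hch).2.2
  have hnil : PySem.Chars.strip l.toList = [] := by
    unfold PySem.Chars.strip PySem.Chars.rstrip at hall ⊢
    set y := (PySem.Chars.lstrip l.toList).reverse with hy
    by_cases hd : y.dropWhile PySem.Chars.isspace = []
    · rw [hd]; rfl
    · exfalso
      have hhead := List.head_dropWhile_not PySem.Chars.isspace hd
      have : PySem.Chars.isspace ((y.dropWhile PySem.Chars.isspace).head hd) = true := by
        have hmem : (y.dropWhile PySem.Chars.isspace).head hd ∈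
            (y.dropWhile PySem.Chars.isspace).reverse := by
          simp [List.head_mem]
        exact List.all_eq_true.mp hall _ hmem
      rw [hhead] at this; exact absurd this (by simp)
  apply h
  have := congrArg String.ofList htl
  rw [String.ofList_toList] at this
  rw [this, hnil]

-- ---- classification pass ----
set_option maxHeartbeats 1600000 in
theorem pvClassStep_eq (st : List Int × List Int) (k : Int) (l : String) :
    pvClassStep st (k, l) =
      if pvIsMend l then (st.1, st.2 ++ [k])
      else if pvIsHdr l then (st.1 ++ [k], st.2) else st := by
  show (if PySem.Str.upper (PySem.Str.strip l) = "MEND" then (st.1, st.2 ++ [k])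
        else if (PySem.Str.split₀ (PySem.Str.strip l) ≠ [] ∧
            PySem.Str.upper ((PySem.List.pyGet? (PySem.Str.split₀ (PySem.Str.strip l)) 0).getD "")
              = "MACRO") then (st.1 ++ [k], st.2) else st) = _
  by_cases hm : PySem.Str.upper (PySem.Str.strip l) = "MEND"
  · rw [if_pos hm, if_pos (show pvIsMend l = true by unfold pvIsMend; simp [hm])]
  · rw [if_neg hm, if_neg (show ¬ pvIsMend l = true by unfold pvIsMend; simp [hm])]
    by_cases hs : PySem.Str.strip l = ""
    · have ht : PySem.Str.split₀ (PySem.Str.strip l) = [] := by rw [hs]; rfl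
      rw [if_neg (by simp [ht]), if_neg (show ¬ pvIsHdr l = true by unfold pvIsHdr; simp [hs])]
    · by_cases hMac : PySem.Str.upper
          ((PySem.List.pyGet? (PySem.Str.split₀ (PySem.Str.strip l)) 0).getD "") = "MACRO"
      · rw [if_pos ⟨pv_strip_split_ne l hs, hMac⟩,
          if_pos (show pvIsHdr l = true by unfold pvIsHdr; simp [hs, hMac])]
      · rw [if_neg (fun hb => hMac hb.2),
          if_neg (show ¬ pvIsHdr l = true by unfold pvIsHdr; simp [hMac])]

theorem pvClassify_fold (ls : List String) : ∀ (k : Int) (st : List Int × List Int),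
    (PySem.List.enumerate ls k).foldl pvClassStep st =
      (st.1 ++ pvHdrPos ls k, st.2 ++ pvMendPos ls k) := by
  induction ls with
  | nil => intro k st; simp [PySem.List.enumerate_nil, pvHdrPos, pvMendPos]
  | cons l r ih =>
    intro k st
    rw [PySem.List.enumerate_cons, List.foldl_cons, pvClassStep_eq]
    by_cases hm : pvIsMend l
    · have hh : pvIsHdr l = false := by
        by_contra hb
        have hh' := (Bool.not_eq_false _).mp hb
        unfold pvIsHdr at hh'
        simp only [Bool.and_eq_true, beq_iff_eq] at hh'
        exact pv_macro_not_mend _ hh'.2 (by unfold pvIsMend at hm; simpa using hm)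
      rw [if_pos hm, ih]
      simp [pvHdrPos, pvMendPos, hm, hh]
    · rw [if_neg hm]
      by_cases hh : pvIsHdr l
      · rw [if_pos hh, ih]
        simp [pvHdrPos, pvMendPos, hm, hh]
      · rw [if_neg hh, ih]
        simp [pvHdrPos, pvMendPos, hm, hh]

-- ---- position bounds and splits ----
theorem pv_hdrPos_mem (s : List String) : ∀ (k p : Int), p ∈ pvHdrPos s k →
    k ≤ p ∧ p < k + s.length := by
  induction s with
  | nil => intro k p h; simp [pvHdrPos] at h
  | cons l r ih =>
    intro k p h
    simp only [pvHdrPos, List.mem_append] at h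
    rcases h with h | h
    · have hpk : p = k := by
        by_cases hc : pvIsHdr l
        · simpa [hc] using h
        · simp [hc] at h
      subst hpk
      refine ⟨le_refl _, ?_⟩
      simp only [List.length_cons]
      push_cast
      omega
    · have := ih (k + 1) p h
      refine ⟨by omega, ?_⟩
      simp only [List.length_cons]
      push_cast
      omega

theorem pv_mendPos_mem (s : List String) : ∀ (k p : Int), p ∈ pvMendPos s k →
    k ≤ p ∧ p < k + s.length := by
  induction s with
  | nil => intro k p h; simp [pvMendPos] at h
  | cons l r ih =>
    intro k p h
    simp only [pvMendPos, List.mem_append] at h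
    rcases h with h | h
    · have hpk : p = k := by
        by_cases hc : pvIsMend l
        · simpa [hc] using h
        · simp [hc] at h
      subst hpk
      refine ⟨le_refl _, ?_⟩
      simp only [List.length_cons]
      push_cast
      omega
    · have := ih (k + 1) p h
      refine ⟨by omega, ?_⟩
      simp only [List.length_cons]
      push_cast
      omega

theorem pv_hdrPos_append (a : List String) : ∀ (b : List String) (k : Int),
    pvHdrPos (a ++ b) k = pvHdrPos a k ++ pvHdrPos b (k + a.length) := by
  induction a with
  | nil => intro b k; simp [pvHdrPos]
  | cons l r ih =>
    intro b k
    simp only [List.cons_append, pvHdrPos, ih, List.append_assoc]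
    have hoff : (k + 1) + (r.length : Int) = k + ((l :: r).length : Int) := by
      simp only [List.length_cons]
      push_cast
      ring
    rw [hoff]

theorem pv_mendPos_append (a : List String) : ∀ (b : List String) (k : Int),
    pvMendPos (a ++ b) k = pvMendPos a k ++ pvMendPos b (k + a.length) := by
  induction a with
  | nil => intro b k; simp [pvMendPos]
  | cons l r ih =>
    intro b k
    simp only [List.cons_append, pvMendPos, ih, List.append_assoc]
    have hoff : (k + 1) + (r.length : Int) = k + ((l :: r).length : Int) := by
      simp only [List.length_cons]
      push_cast
      ring
    rw [hoff]

-- ---- skip-body vs MEND positions ----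
theorem pvSkipBody_mend (s : List String) : ∀ (k : Int),
    (pvMendPos s k = [] → pvSkipBody s = []) ∧
    (∀ (p : Int) (t : List Int), pvMendPos s k = p :: t →
      pvSkipBody s = s.drop (p - k + 1).toNat) := by
  induction s with
  | nil => intro k; exact ⟨fun _ => rfl, fun p t h => by simp [pvMendPos] at h⟩
  | cons l r ih =>
    intro k
    by_cases hm : pvIsMend l
    · have hmd : ¬ PySem.Str.upper (PySem.Str.strip l) ≠ "MEND" := by
        unfold pvIsMend at hm; simpa using hm
      constructor
      · intro h; simp [pvMendPos, hm] at h
      · intro p t h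
        simp only [pvMendPos, hm, if_pos, List.cons_append, List.nil_append,
          List.cons.injEq] at h
        obtain ⟨hp, -⟩ := h
        rw [pvSkipBody, if_neg hmd, ← hp]
        simp
    · have hmd : PySem.Str.upper (PySem.Str.strip l) ≠ "MEND" := by
        unfold pvIsMend at hm; simpa using hm
      have hrec : pvMendPos (l :: r) k = pvMendPos r (k + 1) := by simp [pvMendPos, hm]
      constructor
      · intro h
        rw [hrec] at h
        rw [pvSkipBody, if_pos hmd]
        exact (ih (k + 1)).1 h
      · intro p t h
        rw [hrec] at h
        have hge : k + 1 ≤ p := by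
          have := pv_mendPos_mem r (k + 1) p (by rw [h]; exact List.mem_cons_self ..)
          exact this.1
        rw [pvSkipBody, if_pos hmd, (ih (k + 1)).2 p t h]
        have : (p - k + 1).toNat = (p - (k + 1) + 1).toNat + 1 := by omega
        rw [this, List.drop_succ_cons]

-- ---- find? over MEND positions ----
theorem pv_find_head (s : List String) (k h : Int) (hk : h ≤ k) :
    (pvMendPos s k).find? (fun p => decide (h ≤ p)) = (pvMendPos s k).head? := by
  cases hms : pvMendPos s k with
  | nil => rfl
  | cons p t =>
    have hp : k ≤ p := (pv_mendPos_mem s k p (by rw [hms]; exact List.mem_cons_self ..)).1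
    rw [List.find?_cons_of_pos (by simp only [decide_eq_true_eq]; omega)]
    rfl

-- ---- the B fold: skipping and cursor irrelevance ----
theorem pvFold_skip (lines : List String) (mend : List Int) :
    ∀ (hs : List Int) (c : Int) (mnt : List (String × Int × Int)),
    (∀ h ∈ hs, h < c) →
    hs.foldl (pvStepB lines mend) (c, mnt) = (c, mnt) := by
  intro hs
  induction hs with
  | nil => intro c mnt _; rfl
  | cons h t ih =>
    intro c mnt hlt
    rw [List.foldl_cons]
    have : pvStepB lines mend (c, mnt) h = (c, mnt) := by
      unfold pvStepB
      rw [if_pos (hlt h (List.mem_cons_self ..))]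
    rw [this]
    exact ih c mnt (fun x hx => hlt x (List.mem_cons_of_mem _ hx))

theorem pvFold_cursor (lines : List String) (mend : List Int)
    (hs : List Int) (c₁ c₂ : Int) (mnt : List (String × Int × Int))
    (h1 : ∀ h ∈ hs, ¬ h < c₁) (h2 : ∀ h ∈ hs, ¬ h < c₂) :
    (hs.foldl (pvStepB lines mend) (c₁, mnt)).2 = (hs.foldl (pvStepB lines mend) (c₂, mnt)).2 := by
  cases hs with
  | nil => rfl
  | cons h t =>
    rw [List.foldl_cons, List.foldl_cons]
    have e1 : pvStepB lines mend (c₁, mnt) h = pvStepB lines mend (c₂, mnt) h := by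
      unfold pvStepB
      rw [if_neg (h1 h (List.mem_cons_self ..)), if_neg (h2 h (List.mem_cons_self ..))]
    rw [e1]

-- the MNT entry built from a (stripped) MACRO header line
def pvEntry (line : String) (idx : Int) : String × Int × Int :=
  ((PySem.List.pyGet? (PySem.Str.split₀Max line 2) 1).getD "",
   ((if (PySem.Str.split₀Max line 2).length > 2 then
       ((PySem.Str.split? ((PySem.List.pyGet? (PySem.Str.split₀Max line 2) 2).getD "") ",").getD []).map
         PySem.Str.strip
     else []).length : Int), idx)

-- A-side step lemmas
theorem pvLoopA_nil (idx : Int) : pvLoopA [] idx = [] := by rw [pvLoopA]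

theorem pvLoopA_cons_blank (l : String) (rest : List String) (idx : Int)
    (h0 : PySem.Str.strip l = "") : pvLoopA (l :: rest) idx = pvLoopA rest idx := by
  rw [pvLoopA, if_pos h0]

theorem pvLoopA_cons_macro (l : String) (rest : List String) (idx : Int)
    (h0 : ¬ PySem.Str.strip l = "")
    (hM : PySem.Str.upper ((PySem.List.pyGet? (PySem.Str.split₀ (PySem.Str.strip l)) 0).getD "") = "MACRO") :
    pvLoopA (l :: rest) idx =
      pvEntry (PySem.Str.strip l) idx :: pvLoopA (pvSkipBody (l :: rest)) (idx + 1) := by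
  rw [pvLoopA, if_neg h0, if_pos hM]
  unfold pvEntry
  rfl

theorem pvLoopA_cons_other (l : String) (rest : List String) (idx : Int)
    (h0 : ¬ PySem.Str.strip l = "")
    (hM : ¬ PySem.Str.upper ((PySem.List.pyGet? (PySem.Str.split₀ (PySem.Str.strip l)) 0).getD "") = "MACRO") :
    pvLoopA (l :: rest) idx = pvLoopA rest idx := by
  rw [pvLoopA, if_neg h0, if_neg hM]

-- processing one header position in B's fold
theorem pvStepB_take (lines : List String) (mend : List Int) (c : Int)
    (mnt : List (String × Int × Int)) (h : Int) (hge : ¬ h < c) :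
    pvStepB lines mend (c, mnt) h =
      (match mend.find? (fun p => decide (h ≤ p)) with
       | none => (lines.length : Int)
       | some p => p + 1,
       mnt ++ [pvEntry (PySem.Str.strip ((PySem.List.pyGet? lines h).getD "")) ((mnt.length : Int) + 1)]) := by
  unfold pvStepB pvEntry
  rw [if_neg hge]

-- main invariant: B's cursor walk over the header positions from cursor m computes
-- exactly A's loop over the suffix lines.drop m
set_option maxHeartbeats 3200000 in
theorem pvL (lines : List String) : ∀ (d m : Nat), lines.length - m ≤ d → m ≤ lines.length →
    ∀ (mnt : List (String × Int × Int)),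
    (List.foldl (pvStepB lines (pvMendPos lines 0)) ((m : Int), mnt)
        (pvHdrPos (lines.drop m) (m : Int))).2
      = mnt ++ pvLoopA (lines.drop m) ((mnt.length : Int) + 1) := by
  intro d
  induction d with
  | zero =>
    intro m hd hm mnt
    rw [List.drop_eq_nil_of_le (by omega)]
    simp [pvHdrPos, pvLoopA_nil]
  | succ d ih =>
    intro m hd hm mnt
    cases hdrop : lines.drop m with
    | nil =>
      simp [pvHdrPos, pvLoopA_nil]
    | cons l r =>
      have hml : m < lines.length := by
        by_contra hc
        rw [List.drop_eq_nil_of_le (by omega)] at hdrop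
        exact absurd hdrop (by simp)
      have hr : lines.drop (m + 1) = r := by
        rw [← List.tail_drop, hdrop]
        rfl
      have hlen : r.length = lines.length - (m + 1) := by
        have h2 : (lines.drop (m + 1)).length = lines.length - (m + 1) := List.length_drop ..
        rw [hr] at h2
        exact h2
      by_cases hH : pvIsHdr l
      · -- header line at position m
        have hH' := hH
        unfold pvIsHdr at hH'
        simp only [Bool.and_eq_true, bne_iff_ne, beq_iff_eq] at hH'
        obtain ⟨hs0, hMac⟩ := hH'
        rw [show pvHdrPos (l :: r) (m : Int) = (m : Int) :: pvHdrPos r ((m : Int) + 1) by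
          simp [pvHdrPos, hH]]
        rw [List.foldl_cons, pvStepB_take lines _ _ mnt (m : Int) (lt_irrefl _)]
        have hgl : (PySem.List.pyGet? lines ((m : Nat) : Int)).getD "" = l := by
          rw [PySem.List.pyGet?_natCast]
          have hg : lines[m]? = some l := by
            have h0 : (lines.drop m)[0]? = lines[m + 0]? := List.getElem?_drop
            rw [hdrop] at h0
            simpa using h0.symm
          rw [hg]
          rfl
        rw [hgl]
        have hsplit : pvMendPos lines 0 =
            pvMendPos (lines.take m) 0 ++ pvMendPos (lines.drop m) (m : Int) := by
          conv_lhs => rw [← List.take_append_drop m lines]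
          rw [pv_mendPos_append]
          have : (0 : Int) + ((lines.take m).length : Int) = (m : Int) := by
            rw [List.length_take]
            push_cast [Nat.min_eq_left (Nat.le_of_lt hml)]
            ring
          rw [this]
        have hfind : (pvMendPos lines 0).find? (fun p => decide ((m : Int) ≤ p)) =
            (pvMendPos (lines.drop m) (m : Int)).head? := by
          rw [hsplit, List.find?_append]
          have h1 : (pvMendPos (lines.take m) 0).find? (fun p => decide ((m : Int) ≤ p)) = none := by
            apply List.find?_eq_none.mpr
            intro x hx
            have hb := pv_mendPos_mem _ 0 x hx
            have hlt : (lines.take m).length ≤ m := by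
              rw [List.length_take]
              omega
            simp only [decide_eq_true_eq]
            omega
          rw [h1, Option.none_or]
          exact pv_find_head (lines.drop m) (m : Int) (m : Int) le_rfl
        cases hml2 : pvMendPos (lines.drop m) (m : Int) with
        | nil =>
          have hskip : pvSkipBody (lines.drop m) = [] := (pvSkipBody_mend _ _).1 hml2
          rw [hfind, hml2]
          simp only [List.head?_nil]
          have hskipfold : List.foldl (pvStepB lines (pvMendPos lines 0))
              ((lines.length : Int), mnt ++ [pvEntry (PySem.Str.strip l) ((mnt.length : Int) + 1)])
              (pvHdrPos r ((m : Int) + 1)) =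
              ((lines.length : Int), mnt ++ [pvEntry (PySem.Str.strip l) ((mnt.length : Int) + 1)]) :=
            pvFold_skip lines _ _ _ _ (fun x hx => by
              have hb := pv_hdrPos_mem r ((m : Int) + 1) x hx
              omega)
          rw [hskipfold, pvLoopA_cons_macro l r _ hs0 hMac,
            show pvSkipBody (l :: r) = [] from by rw [← hdrop]; exact hskip, pvLoopA_nil]
        | cons p t =>
          have hpb := pv_mendPos_mem (lines.drop m) (m : Int) p
            (by rw [hml2]; exact List.mem_cons_self ..)
          have hdl : (lines.drop m).length = lines.length - m := List.length_drop ..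
          rw [hdl] at hpb
          set m' : Nat := p.toNat + 1 with hm'
          have hcur : p + 1 = ((m' : Nat) : Int) := by omega
          have hm'le : m' ≤ lines.length := by omega
          have hm'gt : m + 1 ≤ m' := by omega
          have hskip : pvSkipBody (lines.drop m) = lines.drop m' := by
            rw [(pvSkipBody_mend _ _).2 p t hml2, List.drop_drop]
            congr 1
            omega
          rw [hfind, hml2]
          simp only [List.head?_cons]
          have hjlen : (r.take (m' - (m + 1))).length = m' - (m + 1) := by
            rw [List.length_take]
            omega
          rw [show pvHdrPos r ((m : Int) + 1) =
              pvHdrPos (r.take (m' - (m + 1))) ((m : Int) + 1) ++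
                pvHdrPos (lines.drop m') ((m' : Nat) : Int) from by
            conv_lhs => rw [show r = r.take (m' - (m + 1)) ++ lines.drop m' from by
              conv_lhs => rw [← List.take_append_drop (m' - (m + 1)) r]
              rw [← hr, List.drop_drop]
              congr 2
              omega]
            rw [pv_hdrPos_append]
            congr 2
            rw [hjlen]
            omega]
          rw [List.foldl_append]
          have hskipfold : List.foldl (pvStepB lines (pvMendPos lines 0))
              (p + 1, mnt ++ [pvEntry (PySem.Str.strip l) ((mnt.length : Int) + 1)])
              (pvHdrPos (r.take (m' - (m + 1))) ((m : Int) + 1)) =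
              (p + 1, mnt ++ [pvEntry (PySem.Str.strip l) ((mnt.length : Int) + 1)]) :=
            pvFold_skip lines _ _ _ _ (fun x hx => by
              have hb := pv_hdrPos_mem _ ((m : Int) + 1) x hx
              rw [hjlen] at hb
              omega)
          rw [hskipfold, hcur, ih m' (by omega) hm'le _]
          rw [pvLoopA_cons_macro l r _ hs0 hMac,
            show pvSkipBody (l :: r) = lines.drop m' from by rw [← hdrop]; exact hskip]
          have hidx : (((mnt ++ [pvEntry (PySem.Str.strip l) ((mnt.length : Int) + 1)]).length : Int) + 1)
              = ((mnt.length : Int) + 1) + 1 := by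
            simp only [List.length_append, List.length_cons, List.length_nil]
            push_cast
            ring
          rw [hidx, List.append_assoc, List.singleton_append]
      · -- not a header line
        rw [show pvHdrPos (l :: r) (m : Int) = pvHdrPos r ((m : Int) + 1) by
          simp [pvHdrPos, hH]]
        have hcn := pvFold_cursor lines (pvMendPos lines 0) (pvHdrPos r ((m : Int) + 1))
          (m : Int) ((m : Int) + 1) mnt
          (fun x hx => by have := pv_hdrPos_mem r ((m : Int) + 1) x hx; omega)
          (fun x hx => by have := pv_hdrPos_mem r ((m : Int) + 1) x hx; omega)
        rw [hcn]
        have hc2 : ((m : Int) + 1) = (((m + 1 : Nat)) : Int) := by push_cast; ring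
        rw [hc2, ← hr, ih (m + 1) (by omega) (by omega) mnt, hr]
        by_cases hs0 : PySem.Str.strip l = ""
        · rw [pvLoopA_cons_blank l r _ hs0]
        · rw [pvLoopA_cons_other l r _ hs0 ?_]
          intro hM
          exact hH (by unfold pvIsHdr; simp [hs0, hM])

-- ===== VERDICT (by name: the statement is the Claim_ definition above) =====
theorem generate_mnt_spec : Claim_equal_generate_mnt := by
  intro lines _ _
  unfold Spec_generate_mnt generate_mnt generate_mnt_alt pvClassify
  rw [pvClassify_fold lines 0 ([], [])]
  have hmain := pvL lines lines.length 0 (by omega) (by omega) []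
  simp only [List.drop_zero, Nat.cast_zero, List.length_nil, List.nil_append,
    zero_add] at hmain ⊢
  exact hmain.symm
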